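-- pv_equiv track=rewrite | github.com/Rishikoli/aman | agents/legal/ai_legal_analyzer.py | _assess_litigation_severity
-- ===== SOURCE A (Python) =====
-- def _assess_litigation_severity(context: str) -> str:
--     """Assess severity of litigation indicators"""
--     context_lower = context.lower()
--
--     high_severity = ['material', 'significant', 'substantial', 'major', 'critical']
--     low_severity = ['minor', 'minimal', 'resolved', 'settled', 'dismissed']
--
--     high_count = sum(1 for indicator in high_severity if indicator in context_lower)
--     low_count = sum(1 for indicator in low_severity if indicator in context_lower)
--
--     if high_count > low_count:
--         return 'high'
--     elif low_count > high_count: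
--         return 'low'
--     else:
--         return 'medium'
-- ===== SOURCE B (Python) =====
-- def _assess_litigation_severity(context: str) -> str:
--     """Position-driven multi-pattern scan: walk the lowered text once and record
--     which keywords start at each position, instead of running a separate
--     substring search per keyword; then classify by the net weight of the
--     keywords found."""
--     text = context.lower()
--     weights = [('material', 1), ('significant', 1), ('substantial', 1),
--                ('major', 1), ('critical', 1),
--                ('minor', -1), ('minimal', -1), ('resolved', -1),
--                ('settled', -1), ('dismissed', -1)]
--     found = set()
--     for i in range(len(text)):
--         for kw, _ in weights:
--             if kw not in found and text.startswith(kw, i):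
--                 found.add(kw)
--     score = sum(w for kw, w in weights if kw in found)
--     if score > 0:
--         return 'high'
--     if score < 0:
--         return 'low'
--     return 'medium'
-- ===== Notes on version B (the rewrite author's own statement) =====
-- stated objective: alternative
-- what changed: Replaces A's ten independent per-keyword substring-membership tests and two-count comparison with a single position-driven scan of the lowered text that records which keywords start at each index into a set, then classifies the net weight of the found set.
import Mathlib
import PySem

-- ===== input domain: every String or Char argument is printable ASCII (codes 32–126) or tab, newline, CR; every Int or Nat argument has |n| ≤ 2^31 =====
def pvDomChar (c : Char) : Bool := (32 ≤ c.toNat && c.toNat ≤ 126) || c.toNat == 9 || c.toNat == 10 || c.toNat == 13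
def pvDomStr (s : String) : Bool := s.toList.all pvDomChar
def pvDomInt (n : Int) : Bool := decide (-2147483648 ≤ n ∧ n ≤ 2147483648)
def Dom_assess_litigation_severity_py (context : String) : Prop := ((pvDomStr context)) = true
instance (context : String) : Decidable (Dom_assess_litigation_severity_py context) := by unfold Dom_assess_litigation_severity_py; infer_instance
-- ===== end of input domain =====

-- B replaces A's ten independent substring-membership tests with a single
-- position-driven scan collecting the keywords that occur; objective: alternative.


-- ===== PORT A =====
def assess_litigation_severity_py (context : String) : String :=
  let context_lower := PySem.Str.lower context
  let high_severity := ["material", "significant", "substantial", "major", "critical"]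
  let low_severity := ["minor", "minimal", "resolved", "settled", "dismissed"]
  let high_count := high_severity.foldl (fun acc indicator => if PySem.Str.isIn indicator context_lower then acc + 1 else acc) (0 : Int)
  let low_count := low_severity.foldl (fun acc indicator => if PySem.Str.isIn indicator context_lower then acc + 1 else acc) (0 : Int)
  if high_count > low_count then "high"
  else if low_count > high_count then "low"
  else "medium"

-- ===== PORT B =====
-- Source B's weighted keyword list
def pvWeights : List (String × Int) :=
  [("material", 1), ("significant", 1), ("substantial", 1), ("major", 1), ("critical", 1),
   ("minor", -1), ("minimal", -1), ("resolved", -1), ("settled", -1), ("dismissed", -1)]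

-- Source B's double loop: over each position of the text, over each keyword.
-- Python's `text.startswith(kw, i)` with 0 ≤ i is exactly
-- `PySem.Chars.startswith (text.drop i) kw.toList` (kw compared against text[i:]).
def pvScan (text : List Char) : PySem.Set String :=
  (List.range text.length).foldl
    (fun f i => pvWeights.foldl
      (fun f p =>
        if !(PySem.Set.contains f p.1) && PySem.Chars.startswith (text.drop i) p.1.toList
        then PySem.Set.add f p.1 else f) f)
    PySem.Set.empty

def assess_litigation_severity_py_alt (context : String) : String :=
  let text := (PySem.Str.lower context).toList
  let found := pvScan text
  let score := pvWeights.foldl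
    (fun s p => if PySem.Set.contains found p.1 then s + p.2 else s) (0 : Int)
  if score > 0 then "high"
  else if score < 0 then "low"
  else "medium"

-- ===== PRECONDITION & SPEC =====
def Spec_assess_litigation_severity_py (context : String) (out : String) : Prop := out = assess_litigation_severity_py_alt context
instance (context : String) (out : String) : Decidable (Spec_assess_litigation_severity_py context out) := by unfold Spec_assess_litigation_severity_py; infer_instance

-- ===== CLAIM (what is proved, stated in full; the proofs are below) =====
def Claim_equal_assess_litigation_severity_py : Prop := ∀ (context : String), Dom_assess_litigation_severity_py context → Spec_assess_litigation_severity_py context (assess_litigation_severity_py context)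

-- ===== LEMMAS AND PROOFS =====

theorem pv_set_contains_add (f : PySem.Set String) (x kw : String) :
    PySem.Set.contains (PySem.Set.add f x) kw = (PySem.Set.contains f kw || kw == x) := by
  rw [Bool.eq_iff_iff]
  simp only [Bool.or_eq_true, beq_iff_eq, PySem.Set.contains_iff, PySem.Set.mem_add]

-- one inner-loop step: kw ends up in the set iff it was there or it is p's keyword starting here
theorem pv_step_contains (d : List Char) (f : PySem.Set String) (p : String × Int) (kw : String) :
    PySem.Set.contains
      (if !(PySem.Set.contains f p.1) && PySem.Chars.startswith d p.1.toList
       then PySem.Set.add f p.1 else f) kw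
    = (PySem.Set.contains f kw || ((p.1 == kw) && PySem.Chars.startswith d kw.toList)) := by
  by_cases hp : p.1 = kw
  · subst hp
    cases hsw : PySem.Chars.startswith d p.1.toList
    · rw [Bool.and_false, if_neg Bool.false_ne_true, Bool.and_false, Bool.or_false]
    · rw [Bool.and_true, Bool.and_true]
      cases hc : PySem.Set.contains f p.1
      · rw [Bool.not_false, if_pos rfl, pv_set_contains_add, hc]
      · rw [Bool.not_true, if_neg Bool.false_ne_true, hc]
        simp
  · have h2 : (p.1 == kw) = false := beq_eq_false_iff_ne.mpr hp
    have h3 : (kw == p.1) = false := beq_eq_false_iff_ne.mpr (Ne.symm hp)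
    by_cases hcond : (!(PySem.Set.contains f p.1) && PySem.Chars.startswith d p.1.toList) = true
    · rw [if_pos hcond, pv_set_contains_add, h3, h2, Bool.or_false, Bool.false_and, Bool.or_false]
    · rw [if_neg hcond, h2, Bool.false_and, Bool.or_false]

-- after the inner loop over the keyword list, kw is in the set iff it was or it starts here
theorem pv_inner_contains (d : List Char) (L : List (String × Int)) (f : PySem.Set String)
    (kw : String) :
    PySem.Set.contains
      (L.foldl (fun f p =>
        if !(PySem.Set.contains f p.1) && PySem.Chars.startswith d p.1.toList
        then PySem.Set.add f p.1 else f) f) kw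
    = (PySem.Set.contains f kw ||
        (L.any (fun p => p.1 == kw) && PySem.Chars.startswith d kw.toList)) := by
  induction L generalizing f with
  | nil => simp
  | cons p L ih =>
    simp only [List.foldl_cons, List.any_cons, ih, pv_step_contains]
    cases PySem.Chars.startswith d kw.toList <;>
      cases PySem.Set.contains f kw <;> simp

-- after the scan over positions I, kw is in the set iff it was or it starts at some i ∈ I
theorem pv_scan_contains (text : List Char) (I : List Nat) (f : PySem.Set String) (kw : String)
    (hk : pvWeights.any (fun p => p.1 == kw) = true) :
    PySem.Set.contains
      (I.foldl (fun f i => pvWeights.foldl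
        (fun f p =>
          if !(PySem.Set.contains f p.1) && PySem.Chars.startswith (text.drop i) p.1.toList
          then PySem.Set.add f p.1 else f) f) f) kw
    = (PySem.Set.contains f kw ||
        I.any (fun i => PySem.Chars.startswith (text.drop i) kw.toList)) := by
  induction I generalizing f with
  | nil => simp
  | cons i I ih =>
    simp only [List.foldl_cons, List.any_cons, ih, pv_inner_contains, hk, Bool.true_and,
      Bool.or_assoc]

-- the scan finds kw exactly when Python's `kw in text` does
theorem pv_found_eq_isIn (text : List Char) (kw : String)
    (hk : pvWeights.any (fun p => p.1 == kw) = true) (hne : kw ≠ "") :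
    PySem.Set.contains (pvScan text) kw = PySem.Chars.isIn kw.toList text := by
  unfold pvScan
  rw [pv_scan_contains text _ _ kw hk]
  rw [Bool.eq_iff_iff]
  rw [← PySem.Chars.exists_prefix_drop_iff_isIn]
  simp only [PySem.Set.empty, PySem.Set.contains, List.contains_nil, Bool.false_or,
    List.any_eq_true, List.mem_range, PySem.Chars.startswith_iff]
  constructor
  · rintro ⟨i, _, h⟩; exact ⟨i, h⟩
  · rintro ⟨j, hj⟩
    by_cases hlt : j < text.length
    · exact ⟨j, hlt, hj⟩
    · exfalso
      have hnil : text.drop j = [] := List.drop_eq_nil_of_le (le_of_not_gt hlt)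
      rw [hnil] at hj
      have : kw.toList ≠ [] := by simpa using hne
      exact this (List.prefix_nil.mp hj)

-- membership of each keyword in pvWeights, built structurally (no string evaluation)
theorem pv_hk (kw : String) (w : Int) (h : (kw, w) ∈ pvWeights) :
    pvWeights.any (fun p => p.1 == kw) = true :=
  List.any_eq_true.mpr ⟨(kw, w), h, beq_self_eq_true kw⟩

-- the scan finds kw exactly when Python's `kw in s` does (String level)
theorem pv_found_eq_isIn' (s kw : String) (w : Int) (h : (kw, w) ∈ pvWeights)
    (hne : kw ≠ "") :
    PySem.Set.contains (pvScan s.toList) kw = PySem.Str.isIn kw s := by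
  rw [pv_found_eq_isIn _ _ (pv_hk kw w h) hne, PySem.Str.isIn_eq]

theorem pv_weights_split :
    pvWeights
    = ((["material", "significant", "substantial", "major", "critical"] : List String).map
        (fun kw => (kw, (1 : Int))))
      ++ ((["minor", "minimal", "resolved", "settled", "dismissed"] : List String).map
        (fun kw => (kw, (-1 : Int)))) := rfl

theorem pv_fold_map_w (Q : String → Bool) (names : List String) (c : Int) (s0 : Int) :
    (names.map (fun kw => (kw, c))).foldl (fun s p => if Q p.1 then s + p.2 else s) s0
    = s0 + c * (names.countP Q : Int) := by
  induction names generalizing s0 with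
  | nil => simp
  | cons kw names ih =>
    simp only [List.map_cons, List.foldl_cons, List.countP_cons, ih]
    by_cases h : Q kw = true
    · simp only [h, if_pos]
      push_cast
      ring
    · simp only [h, if_false, Bool.false_eq_true]
      push_cast
      ring

theorem pv_countP_high (context : String) :
    (["material", "significant", "substantial", "major", "critical"] : List String).countP
      (fun kw => PySem.Set.contains (pvScan (PySem.Str.lower context).toList) kw)
    = (["material", "significant", "substantial", "major", "critical"] : List String).countP
      (fun kw => PySem.Str.isIn kw (PySem.Str.lower context)) := by
  apply List.countP_congr
  intro kw hkw
  simp only [List.mem_cons, List.not_mem_nil, or_false] at hkw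
  rcases hkw with h | h | h | h | h <;> subst h
  · rw [pv_found_eq_isIn' _ _ 1 (by unfold pvWeights; exact .head _) (by decide)]
  · rw [pv_found_eq_isIn' _ _ 1 (by unfold pvWeights; exact .tail _ (.head _)) (by decide)]
  · rw [pv_found_eq_isIn' _ _ 1 (by unfold pvWeights; exact .tail _ (.tail _ (.head _))) (by decide)]
  · rw [pv_found_eq_isIn' _ _ 1 (by unfold pvWeights; exact .tail _ (.tail _ (.tail _ (.head _)))) (by decide)]
  · rw [pv_found_eq_isIn' _ _ 1 (by unfold pvWeights; exact .tail _ (.tail _ (.tail _ (.tail _ (.head _))))) (by decide)]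

theorem pv_countP_low (context : String) :
    (["minor", "minimal", "resolved", "settled", "dismissed"] : List String).countP
      (fun kw => PySem.Set.contains (pvScan (PySem.Str.lower context).toList) kw)
    = (["minor", "minimal", "resolved", "settled", "dismissed"] : List String).countP
      (fun kw => PySem.Str.isIn kw (PySem.Str.lower context)) := by
  apply List.countP_congr
  intro kw hkw
  simp only [List.mem_cons, List.not_mem_nil, or_false] at hkw
  rcases hkw with h | h | h | h | h <;> subst h
  · rw [pv_found_eq_isIn' _ _ (-1) (by unfold pvWeights; exact .tail _ (.tail _ (.tail _ (.tail _ (.tail _ (.head _)))))) (by decide)]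
  · rw [pv_found_eq_isIn' _ _ (-1) (by unfold pvWeights; exact .tail _ (.tail _ (.tail _ (.tail _ (.tail _ (.tail _ (.head _))))))) (by decide)]
  · rw [pv_found_eq_isIn' _ _ (-1) (by unfold pvWeights; exact .tail _ (.tail _ (.tail _ (.tail _ (.tail _ (.tail _ (.tail _ (.head _)))))))) (by decide)]
  · rw [pv_found_eq_isIn' _ _ (-1) (by unfold pvWeights; exact .tail _ (.tail _ (.tail _ (.tail _ (.tail _ (.tail _ (.tail _ (.tail _ (.head _))))))))) (by decide)]
  · rw [pv_found_eq_isIn' _ _ (-1) (by unfold pvWeights; exact .tail _ (.tail _ (.tail _ (.tail _ (.tail _ (.tail _ (.tail _ (.tail _ (.tail _ (.head _)))))))))) (by decide)]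

theorem pv_classify (H L S : Int) (h : S = H - L) :
    (if H > L then ("high" : String) else if L > H then "low" else "medium")
    = (if S > 0 then "high" else if S < 0 then "low" else "medium") := by
  subst h
  split_ifs <;> first | rfl | (exfalso; omega)

-- ===== VERDICT (by name: the statement is the Claim_ definition above) =====
set_option maxHeartbeats 2000000 in
theorem assess_litigation_severity_py_spec : Claim_equal_assess_litigation_severity_py := by
  intro context _
  unfold Spec_assess_litigation_severity_py assess_litigation_severity_py
    assess_litigation_severity_py_alt
  dsimp only []
  rw [pv_weights_split, List.foldl_append, pv_fold_map_w, pv_fold_map_w,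
    PySem.List.foldl_if_add_one, PySem.List.foldl_if_add_one,
    pv_countP_high, pv_countP_low]
  exact pv_classify _ _ _ (by ring)
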